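-- pv_equiv track=rewrite | github.com/nathaliasenaa/Projeto-2-Nathalia-e-Julia | funcoes.py | calcula_pontos_quina
-- ===== SOURCE A (Python) =====
-- def calcula_pontos_quina (dados_rolados):
--     for x in dados_rolados:
--         n=0
--         for n1 in dados_rolados:
--             if n1==x:
--                 n= n+1
--         if n>=5:
--             return 50
--     return 0
-- ===== SOURCE B (Python) =====
-- def calcula_pontos_quina(dados_rolados):
--     s = sorted(dados_rolados)
--     prev = None
--     cnt = 0
--     for v in s:
--         if prev is not None and v == prev:
--             cnt = cnt + 1
--         else:
--             prev = v
--             cnt = 1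
--         if cnt >= 5:
--             return 50
--     return 0
-- ===== Notes on version B (the rewrite author's own statement) =====
-- stated objective: faster
-- what changed: Replaces A's quadratic rescan (counting each element against the whole list) by sorting a copy and one linear run-length pass that returns 50 as soon as a run reaches length 5.
import Mathlib
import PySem

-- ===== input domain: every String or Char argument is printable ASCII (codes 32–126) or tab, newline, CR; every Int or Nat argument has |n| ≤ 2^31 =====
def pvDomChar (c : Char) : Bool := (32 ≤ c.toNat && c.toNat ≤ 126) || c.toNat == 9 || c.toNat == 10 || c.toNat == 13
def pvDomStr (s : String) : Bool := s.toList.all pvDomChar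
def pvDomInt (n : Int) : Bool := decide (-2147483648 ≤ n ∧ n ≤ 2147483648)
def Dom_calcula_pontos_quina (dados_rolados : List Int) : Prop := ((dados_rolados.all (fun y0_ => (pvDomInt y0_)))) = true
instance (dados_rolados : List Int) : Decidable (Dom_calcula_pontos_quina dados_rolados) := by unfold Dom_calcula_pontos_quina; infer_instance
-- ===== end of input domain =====

-- B sorts a copy of the list and makes one run-length pass (O(n log n)) instead of A's
-- O(n^2) rescan counting each element against the whole list; return value proved equal.

-- ===== PORT A =====
-- inner loop: n = 0; for n1 in dados_rolados: if n1 == x: n = n + 1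
def pvCountA (all : List Int) (x : Int) : Int :=
  all.foldl (fun n n1 => if n1 == x then n + 1 else n) 0

-- outer loop over the (same) list, early return 50
def pvScanA (all : List Int) : List Int → Int
  | [] => 0
  | x :: rest => if pvCountA all x ≥ 5 then 50 else pvScanA all rest

def calcula_pontos_quina (dados_rolados : List Int) : Int :=
  pvScanA dados_rolados dados_rolados

-- ===== PORT B =====
-- run-length scan over the sorted copy: prev (None at start) and running count cnt
def pvRunScan : Option Int → Int → List Int → Int
  | _, _, [] => 0
  | prev, cnt, v :: rest =>
      let c := if prev = some v then cnt + 1 else 1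
      if c ≥ 5 then 50 else pvRunScan (some v) c rest

def calcula_pontos_quina_alt (dados_rolados : List Int) : Int :=
  pvRunScan none 0 (PySem.List.sorted dados_rolados (fun x => x) false)

-- ===== PRECONDITION & SPEC =====
def Spec_calcula_pontos_quina (dados_rolados : List Int) (out : Int) : Prop := out = calcula_pontos_quina_alt dados_rolados
instance (dados_rolados : List Int) (out : Int) : Decidable (Spec_calcula_pontos_quina dados_rolados out) := by unfold Spec_calcula_pontos_quina; infer_instance

-- ===== CLAIM (what is proved, stated in full; the proofs are below) =====
def Claim_equal_calcula_pontos_quina : Prop := ∀ (dados_rolados : List Int), Dom_calcula_pontos_quina dados_rolados → Spec_calcula_pontos_quina dados_rolados (calcula_pontos_quina dados_rolados)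

-- ===== LEMMAS AND PROOFS =====

theorem pvCountConsSelf (v : Int) (l : List Int) : List.count v (v :: l) = List.count v l + 1 := by
  simp

theorem pvCountConsNe (x v : Int) (l : List Int) (h : x ≠ v) : List.count x (v :: l) = List.count x l := by
  simp [Ne.symm h]

-- A's inner loop computes the multiplicity of x in the list
theorem pvCountA_eq (all : List Int) (x : Int) :
    pvCountA all x = (all.count x : Int) := by
  have h : ∀ (l : List Int) (n : Int),
      l.foldl (fun n n1 => if n1 == x then n + 1 else n) n = n + (l.count x : Int) := by
    intro l
    induction l with
    | nil => intro n; simp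
    | cons a t ih =>
        intro n
        rw [List.foldl_cons]
        by_cases hax : a = x
        · have h1 : (a == x) = true := by simp [hax]
          rw [h1, if_pos rfl, ih, hax, pvCountConsSelf x t]
          push_cast; ring
        · have h1 : (a == x) = false := by simp [hax]
          simp only [h1, Bool.false_eq_true, if_false]
          rw [ih, pvCountConsNe x a t (fun h => hax h.symm)]
  unfold pvCountA
  rw [h all 0]
  simp

-- A's outer loop: 50 iff some scanned element has multiplicity >= 5 in `all`
theorem pvScanA_eq (all : List Int) (l : List Int) :
    pvScanA all l = if (∃ x ∈ l, 5 ≤ all.count x) then 50 else 0 := by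
  induction l with
  | nil => simp [pvScanA]
  | cons a t ih =>
      by_cases h : 5 ≤ all.count a
      · have : pvCountA all a ≥ 5 := by rw [pvCountA_eq]; exact_mod_cast h
        simp [pvScanA, this, h]
      · have hn : ¬ pvCountA all a ≥ 5 := by
          rw [pvCountA_eq]; intro hc; exact h (by exact_mod_cast hc)
        simp [pvScanA, hn, ih, h]

-- B's run-length scan on a sorted tail: invariant characterisation
theorem pvRunScan_eq (s : List Int) (p c : Int)
    (hc : c < 5) (hs : List.Pairwise (· ≤ ·) (p :: s)) :
    pvRunScan (some p) c s =
      if (5 ≤ c + (s.count p : Int) ∨ ∃ x ∈ s, x ≠ p ∧ 5 ≤ s.count x) then 50 else 0 := by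
  induction s generalizing p c with
  | nil =>
      simp only [pvRunScan]
      rw [if_neg (by simp; omega)]
  | cons v rest ih =>
      have hpv : p ≤ v := (List.pairwise_cons.mp hs).1 v (by simp)
      have hvrest : ∀ y ∈ rest, v ≤ y :=
        fun y hy => (List.pairwise_cons.mp (List.pairwise_cons.mp hs).2).1 y hy
      have hs' : List.Pairwise (· ≤ ·) (v :: rest) := (List.pairwise_cons.mp hs).2
      by_cases hvp : v = p
      · subst hvp
        have hstep : pvRunScan (some v) c (v :: rest) =
            if c + 1 ≥ 5 then 50 else pvRunScan (some v) (c + 1) rest := by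
          simp [pvRunScan]
        have hcc : (v :: rest).count v = rest.count v + 1 := pvCountConsSelf v rest
        by_cases h5 : (5 : Int) ≤ c + 1
        · rw [hstep, if_pos (by omega), if_pos (by left; omega)]
        · rw [hstep, if_neg (by omega), ih v (c + 1) (by omega) hs']
          congr 1
          apply propext
          constructor
          · rintro (h | ⟨x, hx, hxv, hcx⟩)
            · left; omega
            · refine Or.inr ⟨x, List.mem_cons_of_mem _ hx, hxv, ?_⟩
              rw [pvCountConsNe x v _ hxv]; omega
          · rintro (h | ⟨x, hx, hxv, hcx⟩)
            · left; omega
            · rcases List.mem_cons.mp hx with rfl | hx'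
              · exact absurd rfl hxv
              · refine Or.inr ⟨x, hx', hxv, ?_⟩
                rw [pvCountConsNe x v _ hxv] at hcx; omega
      · -- v ≠ p: p < v ≤ everything after, so p no longer occurs
        have hne : p ≠ v := fun h => hvp h.symm
        have hplt : p < v := lt_of_le_of_ne hpv hne
        have hpnot : p ∉ v :: rest := by
          intro hmem
          rcases List.mem_cons.mp hmem with h' | h'
          · exact hne h'
          · exact absurd (hvrest p h') (by omega)
        have hcp : (v :: rest).count p = 0 := List.count_eq_zero.mpr hpnot
        have hstep : pvRunScan (some p) c (v :: rest) =
            if (1 : Int) ≥ 5 then 50 else pvRunScan (some v) 1 rest := by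
          simp [pvRunScan, hne]
        rw [hstep, if_neg (by omega), ih v 1 (by omega) hs']
        congr 1
        apply propext
        have hcv : (v :: rest).count v = rest.count v + 1 := pvCountConsSelf v rest
        constructor
        · rintro (h | ⟨x, hx, hxv, hcx⟩)
          · exact Or.inr ⟨v, by simp, fun h' => hvp h', by omega⟩
          · have hvx : v ≤ x := hvrest x hx
            refine Or.inr ⟨x, List.mem_cons_of_mem _ hx, by omega, ?_⟩
            rw [pvCountConsNe x v _ hxv]; omega
        · rintro (h | ⟨x, hx, hxp, hcx⟩)
          · exfalso; omega
          · rcases List.mem_cons.mp hx with rfl | hx'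
            · left; omega
            · by_cases hxv : x = v
              · subst hxv; left; omega
              · refine Or.inr ⟨x, hx', hxv, ?_⟩
                rw [pvCountConsNe x v _ hxv] at hcx; omega

-- B computes 50 iff some element has multiplicity >= 5 (via the sorted permutation)
theorem alt_eq (d : List Int) :
    calcula_pontos_quina_alt d = if (∃ x ∈ d, 5 ≤ d.count x) then 50 else 0 := by
  unfold calcula_pontos_quina_alt
  have hperm : (PySem.List.sorted d (fun x => x) false).Perm d := PySem.List.sorted_perm d _ _
  have hpw : List.Pairwise (· ≤ ·) (PySem.List.sorted d (fun x => x) false) := by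
    have := PySem.List.sorted_pairwise (xs := d) (key := fun x => x)
    simpa using this
  have hcnt : ∀ x, (PySem.List.sorted d (fun x => x) false).count x = d.count x :=
    fun x => hperm.count_eq x
  have hmem : ∀ x, x ∈ PySem.List.sorted d (fun x => x) false ↔ x ∈ d :=
    fun x => hperm.mem_iff
  rcases hsort : PySem.List.sorted d (fun x => x) false with _ | ⟨v, rest⟩
  · have hd : d = [] := by
      have := hperm; rw [hsort] at this; exact (List.Perm.nil_eq this).symm
    subst hd; simp [pvRunScan]
  · rw [hsort] at hperm hpw hcnt hmem
    have h1 : pvRunScan none 0 (v :: rest) = pvRunScan (some v) 1 rest := by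
      simp [pvRunScan]
    have hcv : (v :: rest).count v = rest.count v + 1 := pvCountConsSelf v rest
    rw [h1, pvRunScan_eq rest v 1 (by omega) hpw]
    congr 1
    apply propext
    constructor
    · rintro (h | ⟨x, hx, hxv, hcx⟩)
      · exact ⟨v, (hmem v).mp (by simp), by rw [← hcnt v]; omega⟩
      · refine ⟨x, (hmem x).mp (List.mem_cons_of_mem _ hx), ?_⟩
        rw [← hcnt x, pvCountConsNe x v _ hxv]; omega
    · rintro ⟨x, hx, hcx⟩
      rw [← hcnt x] at hcx
      rcases List.mem_cons.mp ((hmem x).mpr hx) with rfl | hx'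
      · left; omega
      · by_cases hxv : x = v
        · subst hxv; left; omega
        · refine Or.inr ⟨x, hx', hxv, ?_⟩
          rw [pvCountConsNe x v _ hxv] at hcx; omega

-- ===== VERDICT (by name: the statement is the Claim_ definition above) =====
theorem calcula_pontos_quina_spec : Claim_equal_calcula_pontos_quina := by
  intro d _
  unfold Spec_calcula_pontos_quina calcula_pontos_quina
  rw [pvScanA_eq, alt_eq]
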